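-- pv_equiv track=rewrite | github.com/daniel-reich/ubiquitous-fiesta | FwCZpyTZDH3QExXE2_21.py | amount_fib
-- ===== SOURCE A (Python) =====
-- def amount_fib(n):
--   if n < 2:
--     return n
--   a, b = 0, 1
--   for i in range(3, 166):
--     a, b = b, a + b
--     if a + b >= n:
--       break
--   return i
-- ===== SOURCE B (Python) =====
-- # Precomputed table of Fibonacci thresholds F(3)..F(165); binary search instead of
-- # regenerating the sequence on every call.
-- _FIBS = []
-- _a, _b = 1, 2
-- for _ in range(163):
--     _FIBS.append(_b)
--     _a, _b = _b, _a + _b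
--
-- def amount_fib(n):
--     if n < 2:
--         return n
--     lo, hi = 0, 162
--     while lo < hi:
--         mid = (lo + hi) // 2
--         if _FIBS[mid] < n:
--             lo = mid + 1
--         else:
--             hi = mid
--     return 3 + lo
-- ===== Notes on version B (the rewrite author's own statement) =====
-- stated objective: alternative
-- what changed: Replaces the per-call fibonacci generate-and-break linear scan with a once-precomputed table of thresholds F(3)..F(165) searched by binary search (bisect_left by hand), capping naturally at index 162.
import Mathlib
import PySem

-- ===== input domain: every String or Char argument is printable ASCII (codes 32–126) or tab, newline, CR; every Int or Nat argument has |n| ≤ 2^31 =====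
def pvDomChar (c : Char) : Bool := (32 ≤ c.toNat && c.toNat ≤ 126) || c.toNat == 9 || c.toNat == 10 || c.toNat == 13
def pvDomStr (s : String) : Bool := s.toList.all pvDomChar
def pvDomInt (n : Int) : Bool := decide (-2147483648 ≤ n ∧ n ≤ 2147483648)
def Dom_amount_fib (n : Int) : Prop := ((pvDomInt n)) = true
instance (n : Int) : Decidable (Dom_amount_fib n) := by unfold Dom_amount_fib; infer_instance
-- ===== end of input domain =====

-- B replaces A's per-call fibonacci generate-and-break scan with a precomputed
-- threshold table F(3)..F(165) searched by hand-written binary search (alternative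
-- decomposition; same return value for every int).

-- ===== PORT A =====
-- the for-loop of A: remaining indices of range(3,166), the (a,b) state, and the
-- last value of the loop variable i (Python's i after the loop / at break)
def fibLoopA (n : Int) : List Int → Int → Int → Int → Int
  | [], _, _, i => i
  | j :: rest, a, b, _ =>
    let a' := b
    let b' := a + b
    if n ≤ a' + b' then j else fibLoopA n rest a' b' j

def amount_fib (n : Int) : Int :=
  if n < 2 then n
  -- range(3,166) is a non-empty constant, so the initial placeholder for i (0) is never returned
  else fibLoopA n (PySem.List.pyRange 3 166 1) 0 1 0

-- ===== PORT B =====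
-- the module-level table build of Source B: k iterations appending b, updating (a,b)
def buildFibs : Nat → Int → Int → List Int
  | 0, _, _ => []
  | k + 1, a, b => b :: buildFibs k b (a + b)

def fibsB : List Int := buildFibs 163 1 2

-- Source B's `while lo < hi` bisect_left loop; lo, hi stay in [0,162] so the index mid
-- is always in range and `getD` is exact for Python's _FIBS[mid]
def bisectLoop (n : Int) (t : List Int) (lo hi : Nat) : Nat :=
  if _h : lo < hi then
    let mid := (lo + hi) / 2
    if t.getD mid 0 < n then bisectLoop n t (mid + 1) hi
    else bisectLoop n t lo mid
  else lo
termination_by hi - lo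
decreasing_by all_goals omega

def amount_fib_alt (n : Int) : Int :=
  if n < 2 then n
  else 3 + (bisectLoop n fibsB 0 162 : Int)

-- ===== PRECONDITION & SPEC =====
def Spec_amount_fib (n : Int) (out : Int) : Prop := out = amount_fib_alt n
instance (n : Int) (out : Int) : Decidable (Spec_amount_fib n out) := by unfold Spec_amount_fib; infer_instance

-- ===== CLAIM (what is proved, stated in full; the proofs are below) =====
def Claim_equal_amount_fib : Prop := ∀ (n : Int), Dom_amount_fib n → Spec_amount_fib n (amount_fib n)

-- ===== LEMMAS AND PROOFS =====

-- generalized fibonacci: fibg i a b = the (i+1)-st element of the sequence a, b, a+b, …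
def fibg : Nat → Int → Int → Int
  | 0, _, b => b
  | i + 1, a, b => fibg i b (a + b)

-- the break test of A's loop, i steps after state (a, b)
def tstA : Nat → Int → Int → Int
  | 0, a, b => a + 2 * b
  | i + 1, a, b => tstA i b (a + b)

theorem buildFibs_length (k : Nat) : ∀ a b : Int, (buildFibs k a b).length = k := by
  induction k with
  | zero => intro a b; rfl
  | succ k ih => intro a b; simp [buildFibs, ih]

theorem fibsB_length : fibsB.length = 163 := buildFibs_length 163 1 2

theorem buildFibs_getD (k : Nat) : ∀ (i : Nat) (a b : Int), i < k →
    (buildFibs k a b).getD i 0 = fibg i a b := by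
  induction k with
  | zero => intro i a b h; omega
  | succ k ih =>
    intro i a b h
    cases i with
    | zero => rfl
    | succ i => simpa [buildFibs, fibg] using ih i b (a + b) (by omega)

theorem tstA_eq_fibg (i : Nat) : ∀ a b : Int, tstA i a b = fibg i (a + b) (a + 2 * b) := by
  induction i with
  | zero => intro a b; rfl
  | succ i ih =>
    intro a b
    show tstA i b (a + b) = fibg i (a + 2 * b) ((a + b) + (a + 2 * b))
    rw [ih b (a + b)]
    congr 1 <;> ring

theorem fibg_lt (i : Nat) : ∀ a b : Int, 0 < a → 0 < b → fibg i a b < fibg i b (a + b) := by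
  induction i with
  | zero => intro a b ha hb; show b < a + b; omega
  | succ i ih =>
    intro a b ha hb
    exact ih b (a + b) hb (by omega)

-- adjacent entries of the table strictly increase
theorem fibsB_adj (j : Nat) (h : j + 1 < 163) :
    fibsB.getD j 0 < fibsB.getD (j + 1) 0 := by
  rw [show fibsB = buildFibs 163 1 2 from rfl,
      buildFibs_getD 163 j 1 2 (by omega), buildFibs_getD 163 (j+1) 1 2 h]
  show fibg j 1 2 < fibg j 2 (1 + 2)
  exact fibg_lt j 1 2 (by norm_num) (by norm_num)

theorem fibsB_mono (j k : Nat) (hjk : j ≤ k) (hk : k < 163) :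
    fibsB.getD j 0 ≤ fibsB.getD k 0 := by
  induction k with
  | zero => have : j = 0 := by omega
            rw [this]
  | succ k ih =>
    rcases Nat.eq_or_lt_of_le hjk with h | h
    · rw [h]
    · exact le_trans (ih (by omega) (by omega)) (le_of_lt (fibsB_adj k hk))

-- first table index whose entry is ≥ n
def fiIdx (n : Int) : Nat := fibsB.findIdx (fun v => decide (n ≤ v))

theorem fiIdx_ge (n : Int) (m : Nat) (hm : m ≤ 163)
    (h : ∀ k, k < m → fibsB.getD k 0 < n) : m ≤ fiIdx n := by
  by_contra hc
  have hc' : fiIdx n < m := by omega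
  have hlt : List.findIdx (fun v => decide (n ≤ v)) fibsB < fibsB.length := by
    unfold fiIdx at hc'; rw [fibsB_length]; omega
  have hp := List.findIdx_getElem (w := hlt)
  have hx := h (fiIdx n) hc'
  unfold fiIdx at hx
  rw [List.getD_eq_getElem fibsB 0 hlt] at hx
  simp only [decide_eq_true_eq] at hp
  omega

theorem fiIdx_le (n : Int) (k : Nat) (hk : k < 163) (h : n ≤ fibsB.getD k 0) :
    fiIdx n ≤ k := by
  by_contra hc
  have hc' : k < List.findIdx (fun v => decide (n ≤ v)) fibsB := by unfold fiIdx at hc; omega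
  have hk' : k < fibsB.length := by rw [fibsB_length]; omega
  have hp := List.not_of_lt_findIdx (p := fun v => decide (n ≤ v)) (xs := fibsB) (i := k) hc'
  rw [List.getD_eq_getElem fibsB 0 hk'] at h
  simp only [decide_eq_false_iff_not] at hp
  exact hp h

-- A's loop, started at position m of the table with matching state, returns the
-- capped first-hit index
theorem fibLoopA_inv (n : Int) (c : Nat) : ∀ (m : Nat) (a b prev : Int),
    m + c = 163 →
    (∀ i, i < c → tstA i a b = fibsB.getD (m + i) 0) →
    (∀ k, k < m → fibsB.getD k 0 < n) →
    (m = 163 → prev = 165) →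
    fibLoopA n (PySem.List.pyRange ((m : Int) + 3) 166 1) a b prev
      = 3 + (min (fiIdx n) 162 : Nat) := by
  induction c with
  | zero =>
    intro m a b prev hmc _ hlt hprev
    have hm : m = 163 := by omega
    rw [PySem.List.pyRange_one_eq_nil (by omega : (166:Int) ≤ (m : Int) + 3)]
    have hfi : 163 ≤ fiIdx n := by
      have := fiIdx_ge n 163 (le_refl _) (fun k hk => hlt k (by omega))
      exact this
    rw [fibLoopA, hprev hm]
    have : min (fiIdx n) 162 = 162 := by omega
    rw [this]; norm_num
  | succ c ih =>
    intro m a b prev hmc htst hlt hprev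
    have hm : m < 163 := by omega
    rw [PySem.List.pyRange_one_cons (by omega : (m : Int) + 3 < 166)]
    rw [fibLoopA]
    have htest : b + (a + b) = fibsB.getD m 0 := by
      have h0 := htst 0 (by omega)
      simp only [tstA, Nat.add_zero] at h0
      omega
    by_cases hbr : n ≤ b + (a + b)
    · rw [if_pos hbr]
      have hge : n ≤ fibsB.getD m 0 := by omega
      have h1 : fiIdx n ≤ m := fiIdx_le n m hm hge
      have h2 : m ≤ fiIdx n := fiIdx_ge n m (by omega) hlt
      have : min (fiIdx n) 162 = m := by omega
      rw [this]; ring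
    · rw [if_neg hbr]
      have hrec := ih (m + 1) b (a + b) ((m : Int) + 3)
        (by omega)
        (fun i hi => by
          have h' := htst (i + 1) (by omega)
          simp only [tstA] at h'
          rwa [show m + (i + 1) = m + 1 + i from by omega] at h')
        (fun k hk => by
          rcases (show k < m ∨ k = m from by omega) with h | h
          · exact hlt k h
          · subst h; omega)
        (fun h163 => by
          have : m = 162 := by omega
          subst this; norm_num)
      have hcast : ((m + 1 : Nat) : Int) + 3 = (m : Int) + 3 + 1 := by push_cast; ring
      rw [hcast] at hrec
      exact hrec

-- B's binary search maintains the classical bisect_left invariants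
theorem bisectLoop_inv (n : Int) (d : Nat) : ∀ (lo hi : Nat), hi - lo ≤ d →
    lo ≤ hi → hi ≤ 162 →
    (∀ k, k < lo → fibsB.getD k 0 < n) →
    (∀ k, hi ≤ k → k < 162 → n ≤ fibsB.getD k 0) →
    bisectLoop n fibsB lo hi = min (fiIdx n) 162 := by
  induction d with
  | zero =>
    intro lo hi hd hle hhi h1 h2
    have heq : lo = hi := by omega
    rw [bisectLoop, dif_neg (by omega : ¬ lo < hi)]
    have hub : fiIdx n ≤ 162 ∨ lo = 162 := by
      by_cases hcase : hi < 162
      · exact Or.inl (le_trans (fiIdx_le n hi (by omega) (h2 hi (le_refl _) hcase)) (by omega))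
      · exact Or.inr (by omega)
    have hge := fiIdx_ge n lo (by omega) h1
    have hle2 : min (fiIdx n) 162 = lo := by
      rcases hub with h | h
      · have : fiIdx n ≤ hi := by
          by_cases hcase : hi < 162
          · exact fiIdx_le n hi (by omega) (h2 hi (le_refl _) hcase)
          · omega
        omega
      · omega
    omega
  | succ d ih =>
    intro lo hi hd hle hhi h1 h2
    by_cases hlt : lo < hi
    · rw [bisectLoop, dif_pos hlt]
      simp only []
      have hmid1 : lo ≤ (lo + hi) / 2 := by omega
      have hmid2 : (lo + hi) / 2 < hi := by omega
      by_cases hc : fibsB.getD ((lo + hi) / 2) 0 < n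
      · rw [if_pos hc]
        exact ih ((lo + hi) / 2 + 1) hi (by omega) (by omega) hhi
          (fun k hk => lt_of_le_of_lt
            (fibsB_mono k ((lo + hi) / 2) (by omega) (by omega)) hc)
          h2
      · rw [if_neg hc]
        have hc' : n ≤ fibsB.getD ((lo + hi) / 2) 0 := by omega
        exact ih lo ((lo + hi) / 2) (by omega) (by omega) (by omega) h1
          (fun k hk1 hk2 => le_trans hc'
            (fibsB_mono ((lo + hi) / 2) k hk1 (by omega)))
    · rw [bisectLoop, dif_neg hlt]
      -- lo = hi here; reuse the base-case reasoning
      have heq : lo = hi := by omega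
      have hub : fiIdx n ≤ 162 ∨ lo = 162 := by
        by_cases hcase : hi < 162
        · exact Or.inl (le_trans (fiIdx_le n hi (by omega) (h2 hi (le_refl _) hcase)) (by omega))
        · exact Or.inr (by omega)
      have hge := fiIdx_ge n lo (by omega) h1
      rcases hub with h | h
      · have : fiIdx n ≤ hi := by
          by_cases hcase : hi < 162
          · exact fiIdx_le n hi (by omega) (h2 hi (le_refl _) hcase)
          · omega
        omega
      · omega

-- ===== VERDICT (by name: the statement is the Claim_ definition above) =====
theorem amount_fib_spec : Claim_equal_amount_fib := by
  intro n _
  unfold Spec_amount_fib amount_fib amount_fib_alt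
  by_cases h2 : n < 2
  · rw [if_pos h2, if_pos h2]
  · rw [if_neg h2, if_neg h2]
    have hA := fibLoopA_inv n 163 0 0 1 0 (by omega)
      (fun i hi => by
        rw [tstA_eq_fibg]
        simp only [Nat.zero_add]
        rw [show fibsB = buildFibs 163 1 2 from rfl, buildFibs_getD 163 i 1 2 hi]
        norm_num)
      (fun k hk => by omega)
      (by omega)
    have hB := bisectLoop_inv n 162 0 162 (by omega) (by omega) (le_refl _)
      (fun k hk => by omega) (fun k hk1 hk2 => by omega)
    rw [show ((0 : Nat) : Int) + 3 = 3 from by norm_num] at hA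
    rw [hA, hB]
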